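-- pv_equiv track=rewrite | github.com/shauxya/PALB-2CSE24-2410031475 | Homework Assignment 10/Problem-91.py | count_unique_vowel_strings
-- ===== SOURCE A (Python) =====
-- from math import factorial
--
-- def count_unique_vowel_strings(s):
--     vowels = set("aeiou")
--
--     freq = {}
--
--     for ch in s:
--         if ch in vowels:
--             freq[ch] = freq.get(ch, 0) + 1
--
--     if not freq:
--         return 0
--
--     product = 1
--     k = 0
--
--     for v in freq:
--         product *= freq[v]
--         k += 1
--
--     return product * factorial(k)
-- ===== SOURCE B (Python) =====
-- from math import factorial
--
-- def count_unique_vowel_strings(s):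
--     # Recursive remove-equal decomposition: peel off the first remaining vowel,
--     # multiply in its multiplicity, and recurse on the list with all its copies removed.
--     def go(chars):
--         if not chars:
--             return 1, 0
--         v = chars[0]
--         rest = [c for c in chars if c != v]
--         p, k = go(rest)
--         return p * chars.count(v), k + 1
--     vs = [c for c in s if c in "aeiou"]
--     if not vs:
--         return 0
--     p, k = go(vs)
--     return p * factorial(k)
-- ===== Notes on version B (the rewrite author's own statement) =====
-- stated objective: alternative
-- what changed: Replaces A's one-pass frequency dict plus dict-iteration product loop by a recursive remove-equal decomposition: filter the vowels, then repeatedly take the first remaining vowel, multiply in its multiplicity via count, and recurse on the list with all its copies filtered out.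
import Mathlib
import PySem

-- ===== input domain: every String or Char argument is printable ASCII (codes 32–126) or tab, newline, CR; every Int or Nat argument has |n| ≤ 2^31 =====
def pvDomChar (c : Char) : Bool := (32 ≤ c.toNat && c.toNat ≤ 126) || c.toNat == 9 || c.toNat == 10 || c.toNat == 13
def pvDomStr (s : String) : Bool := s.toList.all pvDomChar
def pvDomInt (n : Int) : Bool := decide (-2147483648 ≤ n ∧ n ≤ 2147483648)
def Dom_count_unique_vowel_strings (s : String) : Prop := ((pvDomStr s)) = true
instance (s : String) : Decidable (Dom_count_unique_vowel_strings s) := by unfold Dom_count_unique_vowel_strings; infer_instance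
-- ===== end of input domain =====

-- B replaces A's one-pass frequency dict and dict-iteration product loop by a recursive
-- remove-equal decomposition of the filtered vowel list (objective: alternative).

-- math.factorial (shared library helper of both ports; both only apply it to counts ≥ 0)
def pyFactorial (n : Int) : Int := Int.ofNat (Nat.factorial n.toNat)

-- ===== PORT A =====
def count_unique_vowel_strings (s : String) : Int :=
  let vowels : PySem.Set Char := PySem.Set.ofList "aeiou".toList
  -- for ch in s: if ch in vowels: freq[ch] = freq.get(ch, 0) + 1
  let freq : PySem.Dict Char Int :=
    s.toList.foldl (fun d ch =>
      if PySem.Set.contains vowels ch then d.insert ch (d.getD ch 0 + 1) else d)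
      PySem.Dict.empty
  if freq.items = [] then 0
  else
    -- for v in freq: product *= freq[v]; k += 1   (every key v is present, so freq[v] = freq.getD v 0)
    let pk : Int × Int :=
      freq.keys.foldl (fun pk v => (pk.1 * freq.getD v 0, pk.2 + 1)) (1, 0)
    pk.1 * pyFactorial pk.2

-- ===== PORT B =====
-- go(chars): if empty (1,0); else v = chars[0], rest = [c for c in chars if c != v],
--            (p,k) = go(rest); (p * chars.count(v), k + 1)
def pvGo : List Char → Int × Int
  | [] => (1, 0)
  | v :: t =>
    let rest := (v :: t).filter (fun c => decide (c ≠ v))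
    let pk := pvGo rest
    (pk.1 * ((v :: t).count v : Int), pk.2 + 1)
  termination_by l => l.length
  decreasing_by
    rw [List.filter_cons_of_neg (by simp)]
    exact Nat.lt_succ_of_le (List.length_filter_le _ _)

def count_unique_vowel_strings_alt (s : String) : Int :=
  -- vs = [c for c in s if c in "aeiou"]  ('c in "aeiou"' on a 1-char c = list membership; exact)
  let vs : List Char := s.toList.filter (fun c => "aeiou".toList.contains c)
  if vs = [] then 0
  else
    let pk := pvGo vs
    pk.1 * pyFactorial pk.2

-- ===== PRECONDITION & SPEC =====
def Spec_count_unique_vowel_strings (s : String) (out : Int) : Prop := out = count_unique_vowel_strings_alt s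
instance (s : String) (out : Int) : Decidable (Spec_count_unique_vowel_strings s out) := by unfold Spec_count_unique_vowel_strings; infer_instance

-- ===== CLAIM (what is proved, stated in full; the proofs are below) =====
def Claim_equal_count_unique_vowel_strings : Prop := ∀ (s : String), Dom_count_unique_vowel_strings s → Spec_count_unique_vowel_strings s (count_unique_vowel_strings s)

-- ===== LEMMAS AND PROOFS =====

-- Set.add with an element already present in the accumulator is a no-op when folding
theorem pv_foldl_add_filter (v : Char) :
    ∀ (t : List Char) (acc : PySem.Set Char), v ∈ acc →
      t.foldl PySem.Set.add acc = (t.filter (fun c => decide (c ≠ v))).foldl PySem.Set.add acc := by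
  intro t
  induction t with
  | nil => intro acc _; rfl
  | cons u t ih =>
    intro acc hv
    by_cases hu : u = v
    · subst hu
      rw [List.filter_cons_of_neg (by simp), List.foldl_cons,
        show PySem.Set.add acc u = acc from by simp [PySem.Set.add, PySem.Set.contains, hv]]
      exact ih acc hv
    · rw [List.filter_cons_of_pos (by simp [hu]), List.foldl_cons, List.foldl_cons]
      apply ih
      unfold PySem.Set.add
      split
      · exact hv
      · exact List.mem_append_left _ hv

theorem pv_foldl_add_cons (v : Char) :
    ∀ (t : List Char) (s : List Char), v ∉ t →
      t.foldl PySem.Set.add (v :: s) = v :: t.foldl PySem.Set.add s := by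
  intro t
  induction t with
  | nil => intro s _; rfl
  | cons u t ih =>
    intro s hv
    have hne : u ≠ v := fun h => hv (h ▸ List.mem_cons_self)
    have htl : v ∉ t := fun h => hv (List.mem_cons_of_mem _ h)
    simp only [List.foldl_cons]
    have hadd : PySem.Set.add (v :: s) u = v :: PySem.Set.add s u := by
      unfold PySem.Set.add PySem.Set.contains
      simp only [List.contains_cons, show (u == v) = false from by simp [hne], Bool.false_or]
      split <;> simp
    rw [hadd]
    exact ih _ htl

-- first-occurrence dedup of v::t is v followed by the dedup of t with all v's removed
theorem pv_ofList_cons (v : Char) (t : List Char) :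
    PySem.Set.ofList (v :: t) = v :: PySem.Set.ofList (t.filter (fun c => decide (c ≠ v))) := by
  rw [PySem.Set.ofList_eq_foldl, PySem.Set.ofList_eq_foldl]
  simp only [List.foldl_cons]
  have h1 : PySem.Set.add [] v = [v] := rfl
  rw [h1, pv_foldl_add_filter v t [v] (List.mem_singleton.mpr rfl)]
  exact pv_foldl_add_cons v _ _ (by simp)

-- characterisation of B's recursion: product of counts over first-occurrence-distinct elements, and their number
theorem pvGo_eq (l : List Char) :
    pvGo l = (((PySem.Set.ofList l).map (fun u => (l.count u : Int))).prod,
              ((PySem.Set.ofList l).length : Int)) := by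
  induction l using pvGo.induct with
  | case1 => simp [pvGo]
  | case2 v t r0 ih =>
    simp only [pvGo]
    have hr0 : r0 = t.filter (fun c => decide (c ≠ v)) := List.filter_cons_of_neg (by simp)
    rw [ih, pv_ofList_cons, hr0]
    simp only [List.map_cons, List.prod_cons, List.length_cons]
    have hmap : (PySem.Set.ofList (t.filter (fun c => decide (c ≠ v)))).map
          (fun u => (((t.filter (fun c => decide (c ≠ v))).count u : Nat) : Int))
        = (PySem.Set.ofList (t.filter (fun c => decide (c ≠ v)))).map
          (fun u => (((v :: t).count u : Nat) : Int)) := by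
      apply List.map_congr_left
      intro u hu
      have hne : u ≠ v := by
        have h1 := (PySem.Set.mem_ofList _ _).mp hu
        simpa using (List.mem_filter.mp h1).2
      simp [List.count_filter, List.count_cons, hne, Ne.symm hne]
    rw [hmap]
    simp only [Prod.mk.injEq]
    constructor
    · rw [mul_comm]
    · push_cast; ring

theorem count_unique_vowel_strings_eq (s : String) :
    count_unique_vowel_strings s = count_unique_vowel_strings_alt s := by
  unfold count_unique_vowel_strings count_unique_vowel_strings_alt
  simp only
  rw [PySem.List.foldl_if_eq_foldl_filter, PySem.Dict.foldl_insert_getD_add_one_eq_counter]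
  have hpred : PySem.Set.contains (PySem.Set.ofList "aeiou".toList)
      = (fun c => "aeiou".toList.contains c) := by
    funext c
    simp [PySem.Set.contains]
  rw [hpred]
  set vs : List Char := s.toList.filter (fun c => "aeiou".toList.contains c) with hvs
  set K : List Char := PySem.Set.ofList vs with hK
  rw [PySem.Dict.items_counter, PySem.Dict.keys_counter]
  simp only [PySem.Dict.getD_counter]
  rw [PySem.List.foldl_prod_mk (f := fun (a : Int) v => a * (vs.count v : Int))
      (g := fun (a : Int) _ => a + 1)]
  have hcountfold : List.foldl (fun (a : Int) v => a * (vs.count v : Int)) 1 K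
      = (K.map (fun v => (vs.count v : Int))).prod := by
    rw [List.prod_eq_foldl, List.foldl_map]
  have hlenfold : List.foldl (fun (a : Int) _ => a + 1) 0 K = (K.length : Int) := by
    simp [PySem.List.foldl_add (g := fun _ => (1:Int))]
  rw [hcountfold, hlenfold, pvGo_eq]
  have hnil : (K.map (fun k => (k, (vs.count k : Int))) = []) ↔ (vs = []) := by
    simp only [List.map_eq_nil_iff, hK]
    constructor
    · intro h
      by_contra hne
      rcases List.exists_mem_of_ne_nil vs hne with ⟨x, hx⟩
      exact List.not_mem_nil (h ▸ (PySem.Set.mem_ofList _ _).mpr hx)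
    · intro h; rw [h]; rfl
  rw [if_congr hnil rfl rfl]

-- ===== VERDICT (by name: the statement is the Claim_ definition above) =====
theorem count_unique_vowel_strings_spec : Claim_equal_count_unique_vowel_strings := by
  intro s _
  exact count_unique_vowel_strings_eq s
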